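-- pv_equiv track=rewrite | github.com/JuniorJPDJ/py-cuetools | cue_cdtoc2mbtoc.py | _parse_cue_line
-- ===== SOURCE A (Python) =====
-- def _parse_cue_line(line: str):
-- 	line = line.strip()
-- 	words = []
-- 	word = ""
-- 	quote = False
-- 	for x in line:
-- 		if x == '"':
-- 			quote = not quote
-- 		elif x == ' ' and not quote:
-- 			if word:
-- 				words.append(word)
-- 			word = ""
-- 		else:
-- 			word += x
-- 	if word:
-- 		words.append(word)
-- 	return words
-- ===== SOURCE B (Python) =====
-- def _parse_cue_line(line: str):
--     segs = line.strip().split('"')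
--     words = []
--     current = ""
--     for i, seg in enumerate(segs):
--         if i % 2 == 1:
--             current += seg
--         else:
--             pieces = seg.split(' ')
--             current += pieces[0]
--             for p in pieces[1:]:
--                 if current:
--                     words.append(current)
--                 current = p
--     if current:
--         words.append(current)
--     return words
-- ===== Notes on version B (the rewrite author's own statement) =====
-- stated objective: faster
-- what changed: Replaces A's char-by-char quote-toggle loop with a chunk-level pass: split the stripped line on the quote character into alternating outside/inside segments, split only the outside segments on spaces, and carry one string accumulator across segment boundaries; the per-character Python loop is replaced by C-level str.split calls.
import Mathlib
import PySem

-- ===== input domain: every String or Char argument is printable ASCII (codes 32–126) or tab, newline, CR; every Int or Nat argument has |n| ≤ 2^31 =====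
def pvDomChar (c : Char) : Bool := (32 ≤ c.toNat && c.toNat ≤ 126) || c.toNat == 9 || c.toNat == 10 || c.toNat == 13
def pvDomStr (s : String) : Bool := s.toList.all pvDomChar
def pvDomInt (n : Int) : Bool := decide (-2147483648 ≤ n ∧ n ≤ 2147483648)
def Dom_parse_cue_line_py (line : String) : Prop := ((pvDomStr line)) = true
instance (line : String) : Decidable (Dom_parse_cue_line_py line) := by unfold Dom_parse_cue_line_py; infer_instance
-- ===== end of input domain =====

-- B replaces A's char-by-char quote-toggle loop by a chunk-level pass over quote-delimited
-- segments (split on the quote char, then split only the outside segments on spaces); same O(n),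
-- measurably faster in Python (the per-char loop becomes C-level str.split calls).

-- ===== PORT A =====
-- A's loop state: (words, word, quote); word kept as List Char ('word += x' = append)
def pvAStep (s : List String × List Char × Bool) (x : Char) : List String × List Char × Bool :=
  if x = '"' then (s.1, s.2.1, !s.2.2)
  else if x = ' ' ∧ s.2.2 = false then
    ((if s.2.1 ≠ [] then s.1 ++ [String.ofList s.2.1] else s.1), [], s.2.2)
  else (s.1, s.2.1 ++ [x], s.2.2)

def parse_cue_line_py (line : String) : List String :=
  let st := (PySem.Str.strip line).toList.foldl pvAStep ([], [], false)
  if st.2.1 ≠ [] then st.1 ++ [String.ofList st.2.1] else st.1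

-- ===== PORT B =====
-- hand port of Python's str.split(sep) for a ONE-character separator, exact there
-- (keeps empty pieces; '' splits to ['']); pvSplit1 sep cs is cs.split(sep)
def pvSplit1 (sep : Char) : List Char → List (List Char)
  | [] => [[]]
  | c :: cs =>
    if c = sep then [] :: pvSplit1 sep cs
    else match pvSplit1 sep cs with
      | [] => [[c]]            -- unreachable: pvSplit1 never returns []
      | h :: t => (c :: h) :: t

-- 'if current: words.append(current)'
def pvFlush (ws : List String) (cur : List Char) : List String :=
  if cur ≠ [] then ws ++ [String.ofList cur] else ws

-- body of B's inner loop 'for p in pieces[1:]'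
def pvPieceStep (s : List String × List Char) (p : List Char) : List String × List Char :=
  (pvFlush s.1 s.2, p)

-- body of B's outer loop; state (i, words, current), i the enumerate counter
def pvSegStep (s : Nat × List String × List Char) (seg : List Char) : Nat × List String × List Char :=
  if s.1 % 2 = 1 then (s.1 + 1, s.2.1, s.2.2 ++ seg)
  else
    let pieces := pvSplit1 ' ' seg
    let r := pieces.tail.foldl pvPieceStep (s.2.1, s.2.2 ++ pieces.headD [])
    (s.1 + 1, r.1, r.2)

def parse_cue_line_py_alt (line : String) : List String :=
  let segs := pvSplit1 '"' (PySem.Str.strip line).toList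
  let st := segs.foldl pvSegStep (0, [], [])
  pvFlush st.2.1 st.2.2

-- ===== PRECONDITION & SPEC =====
def Spec_parse_cue_line_py (line : String) (out : List String) : Prop := out = parse_cue_line_py_alt line
instance (line : String) (out : List String) : Decidable (Spec_parse_cue_line_py line out) := by unfold Spec_parse_cue_line_py; infer_instance

-- ===== CLAIM (what is proved, stated in full; the proofs are below) =====
def Claim_equal_parse_cue_line_py : Prop := ∀ (line : String), Dom_parse_cue_line_py line → Spec_parse_cue_line_py line (parse_cue_line_py line)

-- ===== LEMMAS AND PROOFS =====

-- reference segment-level processor: proc q segs (ws,cur); q = current quote parity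
def pvProc : Bool → List (List Char) → List String × List Char → List String × List Char
  | _, [], s => s
  | false, seg :: rest, s =>
      pvProc true rest ((pvSplit1 ' ' seg).tail.foldl pvPieceStep (s.1, s.2 ++ (pvSplit1 ' ' seg).headD []))
  | true, seg :: rest, s => pvProc false rest (s.1, s.2 ++ seg)

theorem pvSplit1_ne_nil (sep : Char) (cs : List Char) : pvSplit1 sep cs ≠ [] := by
  induction cs with
  | nil => simp [pvSplit1]
  | cons c cs ih =>
    simp only [pvSplit1]
    split
    · simp
    · cases h : pvSplit1 sep cs <;> simp

theorem pvSplit1_exists (sep : Char) (cs : List Char) :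
    ∃ h t, pvSplit1 sep cs = h :: t := by
  cases h : pvSplit1 sep cs with
  | nil => exact absurd h (pvSplit1_ne_nil sep cs)
  | cons a b => exact ⟨a, b, rfl⟩

-- B's enumerate fold equals the reference processor
theorem pvBside (segs : List (List Char)) (i : Nat) (ws : List String) (cur : List Char) :
    (segs.foldl pvSegStep (i, ws, cur)).2 = pvProc (decide (i % 2 = 1)) segs (ws, cur) := by
  induction segs generalizing i ws cur with
  | nil => simp [pvProc]
  | cons seg rest ih =>
    by_cases hp : i % 2 = 1
    · have h1 : (i + 1) % 2 = 0 := by omega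
      simp only [List.foldl, pvSegStep, hp, if_pos]
      rw [ih]
      simp [h1, pvProc]
    · have h1 : (i + 1) % 2 = 1 := by omega
      simp only [List.foldl, pvSegStep, if_neg hp]
      rw [ih]
      simp [h1, pvProc, hp]

-- core: A's char fold equals the reference processor on the '"'-split segments
theorem pvAside (cs : List Char) (q : Bool) (ws : List String) (cur : List Char) :
    ((cs.foldl pvAStep (ws, cur, q)).1, (cs.foldl pvAStep (ws, cur, q)).2.1)
      = pvProc q (pvSplit1 '"' cs) (ws, cur) := by
  induction cs generalizing q ws cur with
  | nil => cases q <;> simp [pvProc, pvSplit1, List.foldl]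
  | cons c cs ih =>
    by_cases hq : c = '"'
    · subst hq
      have : pvAStep (ws, cur, q) '"' = (ws, cur, !q) := by simp [pvAStep]
      rw [List.foldl_cons, this, ih]
      cases q <;> simp [pvSplit1, pvProc]
    · obtain ⟨h, t, hht⟩ := pvSplit1_exists '"' cs
      have hS : pvSplit1 '"' (c :: cs) = (c :: h) :: t := by
        simp only [pvSplit1, if_neg hq, hht]
      cases q with
      | true =>
        have hstep : pvAStep (ws, cur, true) c = (ws, cur ++ [c], true) := by
          simp [pvAStep, hq]
        rw [List.foldl_cons, hstep, ih, hht, hS]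
        simp [pvProc]
      | false =>
        by_cases hsp : c = ' '
        · subst hsp
          have hstep : pvAStep (ws, cur, false) ' ' = (pvFlush ws cur, [], false) := by
            simp [pvAStep, pvFlush]
          rw [List.foldl_cons, hstep, ih, hht, hS]
          -- even segment starting with a space
          obtain ⟨p, ps, hps⟩ := pvSplit1_exists ' ' h
          have hSpS : pvSplit1 ' ' (' ' :: h) = [] :: p :: ps := by
            simp [pvSplit1, hps]
          simp [pvProc, hps, hSpS, pvPieceStep]
        · have hstep : pvAStep (ws, cur, false) c = (ws, cur ++ [c], false) := by
            simp [pvAStep, hq, hsp]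
          rw [List.foldl_cons, hstep, ih, hht, hS]
          obtain ⟨p, ps, hps⟩ := pvSplit1_exists ' ' h
          have hSc : pvSplit1 ' ' (c :: h) = (c :: p) :: ps := by
            simp only [pvSplit1, if_neg hsp, hps]
          simp [pvProc, hps, hSc]

-- ===== VERDICT (by name: the statement is the Claim_ definition above) =====
theorem parse_cue_line_py_spec : Claim_equal_parse_cue_line_py := by
  intro line _
  show parse_cue_line_py line = parse_cue_line_py_alt line
  have hA := pvAside (PySem.Str.strip line).toList false [] []
  have hB := pvBside (pvSplit1 '\"' (PySem.Str.strip line).toList) 0 [] []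
  rw [show (decide ((0:Nat) % 2 = 1)) = false from rfl] at hB
  have hkey := hA.trans hB.symm
  simp only [parse_cue_line_py, parse_cue_line_py_alt, pvFlush]
  rw [← hkey]
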